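-- pv_equiv track=rewrite | github.com/vijaykumar-alt/python_code | flames_game.py | count_uncommon_letters
-- ===== SOURCE A (Python) =====
-- def count_uncommon_letters(name1, name2):
--     # Convert to lists so we can "cancel out" common letters
--     list1 = list(name1)
--     list2 = list(name2)
--
--     for ch in name1:
--         if ch in list2:
--             list1.remove(ch)
--             list2.remove(ch)
--
--     return len(list1) + len(list2)
-- ===== SOURCE B (Python) =====
-- def count_uncommon_letters(name1, name2):
--     # Sort both names, count shared letters with one linear merge pass.
--     a = sorted(name1)
--     b = sorted(name2)
--     i = j = common = 0
--     while i < len(a) and j < len(b):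
--         if a[i] == b[j]:
--             common += 1
--             i += 1
--             j += 1
--         elif a[i] < b[j]:
--             i += 1
--         else:
--             j += 1
--     return len(name1) + len(name2) - 2 * common
-- ===== Notes on version B (the rewrite author's own statement) =====
-- stated objective: faster
-- what changed: Replaces the quadratic cancel-via-list.remove loop by sorting both names and counting shared letters in a single two-pointer merge pass, returning len1+len2-2*common.
import Mathlib
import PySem

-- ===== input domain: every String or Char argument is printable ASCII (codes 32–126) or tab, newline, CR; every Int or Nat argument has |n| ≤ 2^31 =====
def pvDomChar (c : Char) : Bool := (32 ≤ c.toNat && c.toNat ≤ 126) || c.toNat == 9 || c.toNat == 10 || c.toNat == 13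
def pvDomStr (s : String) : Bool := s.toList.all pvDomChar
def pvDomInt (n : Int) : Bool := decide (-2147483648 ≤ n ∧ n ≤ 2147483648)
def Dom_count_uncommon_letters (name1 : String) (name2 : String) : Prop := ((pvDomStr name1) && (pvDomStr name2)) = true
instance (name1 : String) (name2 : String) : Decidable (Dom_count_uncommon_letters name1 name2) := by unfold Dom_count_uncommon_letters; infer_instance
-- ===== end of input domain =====

-- B sorts both names and counts common letters with one merge pass (O(n log n))
-- instead of A's quadratic cancel-with-list.remove loop; return values are equal.

-- ===== PORT A =====
-- one loop step: if ch is in list2, remove its first occurrence from both lists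
-- (the .getD fallback is unreachable: when taken, ch ∈ list2, and ch ∈ list1 is
--  an invariant of the loop, so both remove? succeed, exactly as Python's .remove)
def pvStepA (st : List Char × List Char) (ch : Char) : List Char × List Char :=
  if st.2.contains ch then
    ((PySem.List.remove? st.1 ch).getD st.1, (PySem.List.remove? st.2 ch).getD st.2)
  else st

def count_uncommon_letters (name1 : String) (name2 : String) : Int :=
  let list1 := name1.toList
  let list2 := name2.toList
  let p := name1.toList.foldl pvStepA (list1, list2)
  ((p.1.length : Int) + (p.2.length : Int))

-- ===== PORT B =====
-- the two-pointer while loop of Source B, as structural recursion on the two suffixes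
def pvMergeCommon : List Char → List Char → Nat
  | [], _ => 0
  | _ :: _, [] => 0
  | x :: a, y :: b =>
    if x = y then pvMergeCommon a b + 1
    else if x < y then pvMergeCommon a (y :: b)
    else pvMergeCommon (x :: a) b

def count_uncommon_letters_alt (name1 : String) (name2 : String) : Int :=
  let a := PySem.List.sorted name1.toList (fun c => c) false
  let b := PySem.List.sorted name2.toList (fun c => c) false
  ((name1.toList.length : Int) + (name2.toList.length : Int))
    - 2 * (pvMergeCommon a b : Int)

-- ===== PRECONDITION & SPEC =====
def Spec_count_uncommon_letters (name1 : String) (name2 : String) (out : Int) : Prop := out = count_uncommon_letters_alt name1 name2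
instance (name1 : String) (name2 : String) (out : Int) : Decidable (Spec_count_uncommon_letters name1 name2 out) := by unfold Spec_count_uncommon_letters; infer_instance

-- ===== CLAIM (what is proved, stated in full; the proofs are below) =====
def Claim_equal_count_uncommon_letters : Prop := ∀ (name1 : String) (name2 : String), Dom_count_uncommon_letters name1 name2 → Spec_count_uncommon_letters name1 name2 (count_uncommon_letters name1 name2)

-- ===== LEMMAS AND PROOFS =====

-- A's loop: total length drops by 2·|cs ∩ l2| (multiset intersection),
-- provided l1 holds at least as many copies of each char as cs (the loop invariant).
theorem loopA_len (cs : List Char) : ∀ (l1 l2 : List Char),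
    (∀ c, cs.count c ≤ l1.count c) →
    ((cs.foldl pvStepA (l1, l2)).1.length + (cs.foldl pvStepA (l1, l2)).2.length)
      + 2 * ((↑cs : Multiset Char) ∩ (↑l2 : Multiset Char)).card
      = l1.length + l2.length := by
  induction cs with
  | nil => intro l1 l2 _; simp
  | cons c cs ih =>
    intro l1 l2 hinv
    have hc1 : c ∈ l1 := by
      have := hinv c
      simp only [List.count_cons_self] at this
      exact List.count_pos_iff.mp (by omega)
    by_cases hc2 : c ∈ l2
    · have hstep : pvStepA (l1, l2) c = (l1.erase c, l2.erase c) := by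
        simp [pvStepA, hc2, PySem.List.remove?_eq_some_erase _ _ hc1,
              PySem.List.remove?_eq_some_erase _ _ hc2]
      have hinv' : ∀ d, cs.count d ≤ (l1.erase c).count d := by
        intro d
        by_cases hd : d = c
        · subst hd
          have := hinv d
          rw [List.count_erase_self]
          simp only [List.count_cons_self] at this
          omega
        · have := hinv d
          rw [List.count_erase_of_ne hd]
          have hne : ¬ (c = d) := fun h => hd h.symm
          simp only [List.count_cons, beq_iff_eq, hne, if_false] at this
          omega
      have hrec := ih (l1.erase c) (l2.erase c) hinv'
      have hcard : ((↑(c :: cs) : Multiset Char) ∩ (↑l2 : Multiset Char)).card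
          = ((↑cs : Multiset Char) ∩ (↑(l2.erase c) : Multiset Char)).card + 1 := by
        have hmem : c ∈ (↑l2 : Multiset Char) := by simpa using hc2
        rw [show ((↑(c :: cs) : Multiset Char)) = c ::ₘ (↑cs : Multiset Char) from rfl,
            Multiset.cons_inter_of_pos _ hmem, Multiset.card_cons,
            show ((↑(l2.erase c) : Multiset Char)) = ((↑l2 : Multiset Char).erase c) from
              (Multiset.coe_erase _ _).symm]
      have hl1 : (l1.erase c).length + 1 = l1.length := by
        have h1 := List.length_erase_of_mem hc1
        have h2 := List.length_pos_of_mem hc1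
        omega
      have hl2 : (l2.erase c).length + 1 = l2.length := by
        have h1 := List.length_erase_of_mem hc2
        have h2 := List.length_pos_of_mem hc2
        omega
      rw [List.foldl_cons, hstep, hcard]
      omega
    · have hstep : pvStepA (l1, l2) c = (l1, l2) := by
        simp [pvStepA, hc2]
      have hinv' : ∀ d, cs.count d ≤ l1.count d := by
        intro d
        have := hinv d
        rw [List.count_cons] at this
        omega
      have hrec := ih l1 l2 hinv'
      have hcard : ((↑(c :: cs) : Multiset Char) ∩ (↑l2 : Multiset Char)).card
          = ((↑cs : Multiset Char) ∩ (↑l2 : Multiset Char)).card := by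
        have hnm : c ∉ (↑l2 : Multiset Char) := by simpa using hc2
        rw [show ((↑(c :: cs) : Multiset Char)) = c ::ₘ (↑cs : Multiset Char) from rfl,
            Multiset.cons_inter_of_neg _ hnm]
      rw [List.foldl_cons, hstep, hcard]
      exact hrec

-- B's merge on two sorted lists counts the multiset intersection.
theorem mergeCommon_card : ∀ (a b : List Char),
    a.Pairwise (· ≤ ·) → b.Pairwise (· ≤ ·) →
    pvMergeCommon a b = ((↑a : Multiset Char) ∩ (↑b : Multiset Char)).card := by
  intro a
  induction a with
  | nil => intro b _ _; simp [pvMergeCommon]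
  | cons x a ih =>
    intro b ha hb
    induction b with
    | nil => simp [pvMergeCommon]
    | cons y b ihb =>
      by_cases hxy : x = y
      · subst hxy
        have hmem : x ∈ (↑(x :: b) : Multiset Char) := by simp
        rw [show pvMergeCommon (x :: a) (x :: b) = pvMergeCommon a b + 1 by
              simp [pvMergeCommon]]
        rw [show ((↑(x :: a) : Multiset Char)) = x ::ₘ (↑a : Multiset Char) from rfl,
            Multiset.cons_inter_of_pos _ hmem]
        have : ((↑(x :: b) : Multiset Char).erase x) = (↑b : Multiset Char) := by simp
        rw [this, Multiset.card_cons,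
            ih b (List.Pairwise.of_cons ha) (List.Pairwise.of_cons hb)]
      · by_cases hlt : x < y
        · -- x < every element of y :: b, so x contributes nothing
          have hxnot : x ∉ (y :: b) := by
            intro hmem
            rcases List.mem_cons.mp hmem with h | h
            · exact hxy h
            · have := List.rel_of_pairwise_cons hb h
              exact absurd (lt_of_lt_of_le hlt this) (lt_irrefl x)
          rw [show pvMergeCommon (x :: a) (y :: b) = pvMergeCommon a (y :: b) by
                simp [pvMergeCommon, hxy, hlt]]
          have hnm : x ∉ (↑(y :: b) : Multiset Char) := by simpa using hxnot
          rw [show ((↑(x :: a) : Multiset Char)) = x ::ₘ (↑a : Multiset Char) from rfl,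
              Multiset.cons_inter_of_neg _ hnm]
          exact ih (y :: b) (List.Pairwise.of_cons ha) hb
        · -- y < x, so y ∉ x :: a
          have hylt : y < x := lt_of_le_of_ne (le_of_not_gt hlt) (fun h => hxy h.symm)
          have hynot : y ∉ (x :: a) := by
            intro hmem
            rcases List.mem_cons.mp hmem with h | h
            · exact hxy h.symm
            · have := List.rel_of_pairwise_cons ha h
              exact absurd (lt_of_lt_of_le hylt this) (lt_irrefl y)
          rw [show pvMergeCommon (x :: a) (y :: b) = pvMergeCommon (x :: a) b by
                simp [pvMergeCommon, hxy, hlt]]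
          have hnm : y ∉ (↑(x :: a) : Multiset Char) := by simpa using hynot
          rw [Multiset.inter_comm,
              show ((↑(y :: b) : Multiset Char)) = y ::ₘ (↑b : Multiset Char) from rfl,
              Multiset.cons_inter_of_neg _ hnm, Multiset.inter_comm]
          exact ihb (List.Pairwise.of_cons hb)

-- ===== VERDICT (by name: the statement is the Claim_ definition above) =====
theorem count_uncommon_letters_spec : Claim_equal_count_uncommon_letters := by
  intro name1 name2 _
  unfold Spec_count_uncommon_letters count_uncommon_letters count_uncommon_letters_alt
  set cs := name1.toList with hcs
  set l2 := name2.toList with hl2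
  have hA := loopA_len cs cs l2 (fun c => le_refl _)
  set sa := PySem.List.sorted cs (fun c => c) false with hsa
  set sb := PySem.List.sorted l2 (fun c => c) false with hsb
  have hpa : sa.Perm cs := PySem.List.sorted_perm ..
  have hpb : sb.Perm l2 := PySem.List.sorted_perm ..
  have hB := mergeCommon_card sa sb
      (by simpa using PySem.List.sorted_pairwise cs (fun c => c))
      (by simpa using PySem.List.sorted_pairwise l2 (fun c => c))
  have hma : (↑sa : Multiset Char) = (↑cs : Multiset Char) := by
    exact_mod_cast Quot.sound hpa
  have hmb : (↑sb : Multiset Char) = (↑l2 : Multiset Char) := by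
    exact_mod_cast Quot.sound hpb
  rw [hma, hmb] at hB
  simp only []
  rw [hB]
  omega
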